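-- pv_equiv track=rewrite | github.com/ukkodeveloper/algorithm | programmers/크레인_인형뽑기.py | solution
-- ===== SOURCE A (Python) =====
-- def solution(board, moves):
--     # d/ 인형 스택 관리
--     # d/ count
--     answer = 0
--     stack = []
--
--     # d/ 행별 lane
--     lanes = [list(filter(lambda x: x!=0, reversed(lane))) for lane in zip(*board)]
--
--     # l/ moves 이동하면서 스택 제거
--     for move in moves:
--         if lanes[move - 1]:
--             doll = lanes[move - 1].pop()
--
--             if stack and stack[-1] == doll:
--                 stack.pop()
--                 answer += 2
--             else:
--                 stack.append(doll)
--
--     return answer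
-- ===== SOURCE B (Python) =====
-- def solution(board, moves):
--     # Keep an integer cursor per column and scan the raw (unfiltered) columns
--     # lazily, instead of prebuilding filtered doll stacks and popping them.
--     cols = list(zip(*board))
--     cursors = [0] * len(cols)
--     stack = []
--     answer = 0
--     for move in moves:
--         c = move - 1
--         k = cursors[c]
--         lane = cols[c]
--         doll = 0
--         while k < len(lane):
--             v = lane[k]
--             k += 1
--             if v:
--                 doll = v
--                 break
--         cursors[c] = k
--         if doll:
--             if stack and stack[-1] == doll:
--                 stack.pop()
--                 answer += 2
--             else:
--                 stack.append(doll)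
--     return answer
-- ===== Notes on version B (the rewrite author's own statement) =====
-- stated objective: alternative
-- what changed: Replaces A's up-front construction of filtered, reversed per-column doll stacks (pop-mutation per move) with one integer cursor per raw column that lazily scans past zeros on each move; no filtered stacks are ever built.
import Mathlib
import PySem

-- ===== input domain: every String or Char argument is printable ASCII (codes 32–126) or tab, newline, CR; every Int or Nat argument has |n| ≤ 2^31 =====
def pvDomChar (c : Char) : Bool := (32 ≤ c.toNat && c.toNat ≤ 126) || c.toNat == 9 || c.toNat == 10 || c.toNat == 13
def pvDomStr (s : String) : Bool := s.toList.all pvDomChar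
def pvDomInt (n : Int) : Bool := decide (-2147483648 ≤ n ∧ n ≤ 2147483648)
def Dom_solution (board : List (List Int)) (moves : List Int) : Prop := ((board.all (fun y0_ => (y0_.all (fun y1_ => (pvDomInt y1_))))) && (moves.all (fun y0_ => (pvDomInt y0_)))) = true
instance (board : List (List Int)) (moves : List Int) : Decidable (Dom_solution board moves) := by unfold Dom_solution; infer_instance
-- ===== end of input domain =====

-- B replaces A's precomputed filtered lane stacks with per-column integer cursors that lazily scan the raw columns (alternative decomposition, similar cost).


-- ===== PORT A =====
-- zip(*board): column j (for j below the shortest row length) of every row; exact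
-- because j < each row's length, so getD's default is never used.
def pvZip (board : List (List Int)) : List (List Int) :=
  (List.range ((board.map List.length).min?.getD 0)).map
    (fun j => board.map (fun r => r.getD j 0))

-- one iteration of A's for-loop; Python's stack top stack[-1] is the list head here.
-- The `none` branch is Python's IndexError (excluded by Pre_solution).
def pvStepA (st : Int × List Int × List (List Int)) (move : Int) :
    Int × List Int × List (List Int) :=
  match PySem.List.pyGet? st.2.2 (move - 1) with
  | none => st
  | some lane =>
    if lane = [] then st
    else
      let doll := lane.getLastD 0
      let lanes' := PySem.List.pySetD st.2.2 (move - 1) lane.dropLast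
      match st.2.1 with
      | top :: rest =>
        if top = doll then (st.1 + 2, rest, lanes') else (st.1, doll :: top :: rest, lanes')
      | [] => (st.1, [doll], lanes')

def solution (board : List (List Int)) (moves : List Int) : Int :=
  let lanes := (pvZip board).map (fun lane => lane.reverse.filter (fun x => x ≠ 0))
  (moves.foldl pvStepA (0, [], lanes)).1

-- ===== PORT B =====
-- the while-loop over indices k..len(lane): first non-zero entry of the remaining
-- column (0 if none) and the number of entries consumed.
def pvScanB : List Int → Int × Nat
  | [] => (0, 0)
  | v :: rest => if v ≠ 0 then (v, 1) else ((pvScanB rest).1, (pvScanB rest).2 + 1)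

-- one iteration of B's for-loop; cursors are Python ints that stay ≥ 0, kept as Nat.
-- The `none` branch of the cursor lookup is Python's IndexError (excluded by
-- Pre_solution); the column lookup is then in range too (same list length).
def pvStepB (cols : List (List Int)) (st : Int × List Int × List Nat) (move : Int) :
    Int × List Int × List Nat :=
  match PySem.List.pyGet? st.2.2 (move - 1) with
  | none => st
  | some k =>
    let lane := (PySem.List.pyGet? cols (move - 1)).getD []
    let p := pvScanB (lane.drop k)
    let cursors' := PySem.List.pySetD st.2.2 (move - 1) (k + p.2)
    if p.1 ≠ 0 then
      match st.2.1 with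
      | top :: rest =>
        if top = p.1 then (st.1 + 2, rest, cursors') else (st.1, p.1 :: top :: rest, cursors')
      | [] => (st.1, [p.1], cursors')
    else (st.1, st.2.1, cursors')

def solution_alt (board : List (List Int)) (moves : List Int) : Int :=
  let cols := pvZip board
  (moves.foldl (pvStepB cols) (0, [], List.replicate cols.length 0)).1

-- ===== PRECONDITION & SPEC =====
-- Pre_ excludes exactly the inputs on which A raises IndexError: a move whose
-- index move-1 falls outside the column list (Python wraparound for negative
-- indices included; both programs raise there).
def Pre_solution (board : List (List Int)) (moves : List Int) : Prop :=
  ∀ m ∈ moves, PySem.Raise.InRange ((board.map List.length).min?.getD 0) (m - 1)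
instance (board : List (List Int)) (moves : List Int) : Decidable (Pre_solution board moves) := by
  unfold Pre_solution; infer_instance

def pvWitness_solution : List (List Int) × List Int :=
  ([[0, 0, 0], [0, 1, 0], [2, 1, 3]], [2, 2, 1, 3])

def Spec_solution (board : List (List Int)) (moves : List Int) (out : Int) : Prop := out = solution_alt board moves
instance (board : List (List Int)) (moves : List Int) (out : Int) : Decidable (Spec_solution board moves out) := by unfold Spec_solution; infer_instance

-- ===== CLAIM (what is proved, stated in full; the proofs are below) =====
def Claim_equal_solution : Prop := ∀ (board : List (List Int)) (moves : List Int), Dom_solution board moves → Pre_solution board moves → Spec_solution board moves (solution board moves)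

-- ===== LEMMAS AND PROOFS =====

-- resolved Python index for a wrapping in-range lookup
def pvResolve (n : Nat) (i : Int) : Nat := if 0 ≤ i then i.toNat else (i + n).toNat

lemma pvZip_length (board : List (List Int)) :
    (pvZip board).length = (board.map List.length).min?.getD 0 := by
  simp [pvZip]

lemma inRange_bounds (n : Nat) (i : Int) (h : PySem.Raise.InRange n i) :
    -(n : Int) ≤ i ∧ i < n := by
  simpa [PySem.Raise.InRange] using h

lemma pvResolve_lt (n : Nat) (i : Int) (h0 : -(n : Int) ≤ i) (h1 : i < n) :
    pvResolve n i < n := by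
  unfold pvResolve; split_ifs <;> omega

lemma pyGet?_resolve {α : Type} (xs : List α) (i : Int) (d : α)
    (h0 : -(xs.length : Int) ≤ i) (h1 : i < xs.length) :
    PySem.List.pyGet? xs i = some (xs.getD (pvResolve xs.length i) d) := by
  unfold pvResolve
  by_cases h : 0 ≤ i
  · rw [PySem.List.pyGet?_of_nonneg _ h, if_pos h, List.getD_eq_getElem?_getD,
      List.getElem?_eq_getElem (by omega)]
    simp
  · obtain ⟨k, hk1, hk2, hk3⟩ : ∃ k : Nat, 0 < k ∧ k ≤ xs.length ∧ i = -(k : Int) :=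
      ⟨(-i).toNat, by omega, by omega, by omega⟩
    have hidx : (if 0 ≤ i then i.toNat else (i + xs.length).toNat) = xs.length - k := by
      split_ifs <;> omega
    rw [hidx, hk3, PySem.List.pyGet?_neg_natCast _ _ hk1 hk2,
      List.getD_eq_getElem?_getD, List.getElem?_eq_getElem (show xs.length - k < xs.length by omega)]
    simp

lemma pySetD_resolve {α : Type} (xs : List α) (i : Int) (v : α)
    (h0 : -(xs.length : Int) ≤ i) (h1 : i < xs.length) :
    PySem.List.pySetD xs i v = xs.set (pvResolve xs.length i) v := by
  simp only [PySem.List.pySetD, PySem.List.pySet?, PySem.List.pyIdx?, pvResolve]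
  by_cases h : 0 ≤ i
  · rw [if_pos h, if_pos (by omega), if_pos h]
    rfl
  · rw [if_neg h, if_pos (by omega), if_neg h]
    simp only [Option.map_some, Option.getD_some]
    congr 1
    omega

lemma pvScanB_spec (l : List Int) :
    (l.filter (fun x => x ≠ 0) = [] → pvScanB l = (0, l.length)) ∧
    (∀ d t, l.filter (fun x => x ≠ 0) = d :: t →
      (pvScanB l).1 = d ∧ (l.drop (pvScanB l).2).filter (fun x => x ≠ 0) = t) := by
  induction l with
  | nil => simp [pvScanB]
  | cons v rest ih =>
    by_cases hv : v = 0
    · subst hv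
      have hf : List.filter (fun x => x ≠ 0) ((0 : Int) :: rest) =
          List.filter (fun x => x ≠ 0) rest := by simp
      have hs : pvScanB ((0 : Int) :: rest) = ((pvScanB rest).1, (pvScanB rest).2 + 1) := by
        simp [pvScanB]
      refine ⟨fun h => ?_, fun d t h => ?_⟩
      · rw [hf] at h
        rw [hs, ih.1 h]
        simp
      · rw [hf] at h
        obtain ⟨h1, h2⟩ := ih.2 d t h
        rw [hs]
        exact ⟨h1, by simpa using h2⟩
    · have hf : List.filter (fun x => x ≠ 0) (v :: rest) =
          v :: List.filter (fun x => x ≠ 0) rest := by simp [hv]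
      have hs : pvScanB (v :: rest) = (v, 1) := by simp [pvScanB, hv]
      refine ⟨fun h => ?_, fun d t h => ?_⟩
      · rw [hf] at h; cases h
      · rw [hf] at h
        injection h with h1 h2
        rw [hs]
        exact ⟨h1, by simpa using h2⟩

-- the simulation invariant: each lane of A is the reversed non-zero remainder of its
-- raw column below B's cursor
def pvRel (cols lanes : List (List Int)) (cursors : List Nat) : Prop :=
  lanes.length = cols.length ∧ cursors.length = cols.length ∧
  ∀ j, j < cols.length →
    lanes.getD j [] = (((cols.getD j []).drop (cursors.getD j 0)).filter (fun x => x ≠ 0)).reverse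

lemma step_sim (cols : List (List Int)) (a : Int) (stk : List Int)
    (lanes : List (List Int)) (cursors : List Nat) (move : Int)
    (hrel : pvRel cols lanes cursors) (hm : PySem.Raise.InRange cols.length (move - 1)) :
    (pvStepA (a, stk, lanes) move).1 = (pvStepB cols (a, stk, cursors) move).1 ∧
    (pvStepA (a, stk, lanes) move).2.1 = (pvStepB cols (a, stk, cursors) move).2.1 ∧
    pvRel cols (pvStepA (a, stk, lanes) move).2.2 (pvStepB cols (a, stk, cursors) move).2.2 := by
  obtain ⟨hlen, hclen, hinv⟩ := hrel
  obtain ⟨hb0, hb1⟩ := inRange_bounds cols.length (move - 1) hm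
  set r := pvResolve cols.length (move - 1) with hrdef
  have hrN : r < cols.length := pvResolve_lt cols.length (move - 1) hb0 hb1
  have hgetA : PySem.List.pyGet? lanes (move - 1) = some (lanes.getD r []) := by
    rw [pyGet?_resolve lanes (move - 1) [] (by omega) (by omega), hlen]
  have hgetB : PySem.List.pyGet? cursors (move - 1) = some (cursors.getD r 0) := by
    rw [pyGet?_resolve cursors (move - 1) 0 (by omega) (by omega), hclen]
  have hgetC : PySem.List.pyGet? cols (move - 1) = some (cols.getD r []) :=
    pyGet?_resolve cols (move - 1) [] (by omega) (by omega)
  set k := cursors.getD r 0 with hk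
  have hlane : lanes.getD r [] = (((cols.getD r []).drop k).filter (fun x => x ≠ 0)).reverse :=
    hinv r hrN
  set fl := ((cols.getD r []).drop k).filter (fun x => x ≠ 0) with hfl
  cases hflc : fl with
  | nil =>
    -- empty lane: A leaves the state alone, B only advances the cursor over zeros
    have hlaneE : lanes.getD r [] = [] := by rw [hlane, hflc]; rfl
    have hsc : pvScanB ((cols.getD r []).drop k) = (0, ((cols.getD r []).drop k).length) :=
      (pvScanB_spec _).1 (by rw [← hfl]; exact hflc)
    have hA : pvStepA (a, stk, lanes) move = (a, stk, lanes) := by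
      unfold pvStepA
      rw [hgetA, hlaneE]
      simp
    have hB : pvStepB cols (a, stk, cursors) move =
        (a, stk, cursors.set r (k + ((cols.getD r []).drop k).length)) := by
      unfold pvStepB
      rw [hgetB]
      simp only [hgetC, Option.getD_some, hsc, ne_eq, not_true_eq_false, if_false]
      rw [pySetD_resolve cursors (move - 1) _ (by omega) (by omega), hclen, ← hrdef]
    rw [hA, hB]
    refine ⟨rfl, rfl, hlen, by simp [hclen], fun j hj => ?_⟩
    dsimp only
    by_cases hjr2 : j = r
    · subst hjr2
      rw [hlaneE, List.getD_eq_getElem?_getD, List.getElem?_set, if_pos rfl,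
        if_pos (by omega), Option.getD_some]
      have hnil : ((cols.getD r []).drop (k + ((cols.getD r []).drop k).length)).filter
          (fun x => x ≠ 0) = [] := by
        rw [← List.drop_drop]
        refine List.sublist_nil.mp ?_
        have h1 : ((((cols.getD r []).drop k).drop ((cols.getD r []).drop k).length).filter
            (fun x => x ≠ 0)).Sublist (((cols.getD r []).drop k).filter (fun x => x ≠ 0)) :=
          List.Sublist.filter _ (List.drop_sublist _ _)
        rw [← hfl, hflc] at h1
        exact h1
      rw [hnil, List.reverse_nil]
    · rw [List.getD_eq_getElem?_getD (l := cursors.set _ _), List.getElem?_set,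
        if_neg (Ne.symm hjr2), ← List.getD_eq_getElem?_getD]
      exact hinv j hj
  | cons d t =>
    -- non-empty lane: A pops d, B scans down to d and advances the cursor past it
    have hlaneC : lanes.getD r [] = t.reverse ++ [d] := by
      rw [hlane, hflc, List.reverse_cons]
    have hsc := (pvScanB_spec ((cols.getD r []).drop k)).2 d t (by rw [← hfl]; exact hflc)
    have hd0 : d ≠ 0 := by
      have hdm : d ∈ fl := by rw [hflc]; exact List.mem_cons_self
      rw [hfl] at hdm
      have := List.of_mem_filter hdm
      simpa using this
    have hsetA : PySem.List.pySetD lanes (move - 1) (t.reverse ++ [d]).dropLast =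
        lanes.set r t.reverse := by
      rw [List.dropLast_concat, pySetD_resolve lanes (move - 1) _ (by omega) (by omega), hlen]
    have hA : pvStepA (a, stk, lanes) move =
        (match stk with
          | top :: rest =>
            if top = d then (a + 2, rest, lanes.set r t.reverse)
            else (a, d :: top :: rest, lanes.set r t.reverse)
          | [] => (a, [d], lanes.set r t.reverse)) := by
      unfold pvStepA
      rw [hgetA, hlaneC]
      simp only [List.getLastD_concat, hsetA]
      rw [if_neg (by simp)]
    have hsetB : PySem.List.pySetD cursors (move - 1) (k + (pvScanB ((cols.getD r []).drop k)).2) =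
        cursors.set r (k + (pvScanB ((cols.getD r []).drop k)).2) := by
      rw [pySetD_resolve cursors (move - 1) _ (by omega) (by omega), hclen]
    have hB : pvStepB cols (a, stk, cursors) move =
        (match stk with
          | top :: rest =>
            if top = d then
              (a + 2, rest, cursors.set r (k + (pvScanB ((cols.getD r []).drop k)).2))
            else (a, d :: top :: rest,
              cursors.set r (k + (pvScanB ((cols.getD r []).drop k)).2))
          | [] => (a, [d], cursors.set r (k + (pvScanB ((cols.getD r []).drop k)).2))) := by
      unfold pvStepB
      rw [hgetB]
      simp only [hgetC, Option.getD_some, hsc.1, ne_eq, hd0, not_false_eq_true, if_true, hsetB]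
      cases stk <;> rfl
    have hrel' : pvRel cols (lanes.set r t.reverse)
        (cursors.set r (k + (pvScanB ((cols.getD r []).drop k)).2)) := by
      refine ⟨by simp [hlen], by simp [hclen], fun j hj => ?_⟩
      by_cases hjr2 : j = r
      · subst hjr2
        rw [List.getD_eq_getElem?_getD, List.getElem?_set, if_pos rfl, if_pos (by omega),
          Option.getD_some, List.getD_eq_getElem?_getD (l := cursors.set _ _),
          List.getElem?_set, if_pos rfl, if_pos (by omega), Option.getD_some]
        rw [← List.drop_drop, hsc.2]
      · rw [List.getD_eq_getElem?_getD, List.getElem?_set, if_neg (Ne.symm hjr2),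
          ← List.getD_eq_getElem?_getD, List.getD_eq_getElem?_getD (l := cursors.set _ _),
          List.getElem?_set, if_neg (Ne.symm hjr2), ← List.getD_eq_getElem?_getD]
        exact hinv j hj
    rw [hA, hB]
    cases stk with
    | nil => exact ⟨rfl, rfl, hrel'⟩
    | cons top rest =>
      dsimp only
      by_cases htop : top = d
      · rw [if_pos htop, if_pos htop]
        exact ⟨rfl, rfl, hrel'⟩
      · rw [if_neg htop, if_neg htop]
        exact ⟨rfl, rfl, hrel'⟩

lemma fold_sim (cols : List (List Int)) (moves : List Int) :
    ∀ (a : Int) (stk : List Int) (lanes : List (List Int)) (cursors : List Nat),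
    pvRel cols lanes cursors → (∀ m ∈ moves, PySem.Raise.InRange cols.length (m - 1)) →
    (moves.foldl pvStepA (a, stk, lanes)).1 =
      (moves.foldl (pvStepB cols) (a, stk, cursors)).1 := by
  induction moves with
  | nil => intro a stk lanes cursors hrel _; rfl
  | cons m rest ih =>
    intro a stk lanes cursors hrel hmv
    have hstep := step_sim cols a stk lanes cursors m hrel (hmv m List.mem_cons_self)
    simp only [List.foldl_cons]
    obtain ⟨h1, h2, h3⟩ := hstep
    have hA : pvStepA (a, stk, lanes) m =
        ((pvStepA (a, stk, lanes) m).1, (pvStepA (a, stk, lanes) m).2.1,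
          (pvStepA (a, stk, lanes) m).2.2) := rfl
    have hB : pvStepB cols (a, stk, cursors) m =
        ((pvStepB cols (a, stk, cursors) m).1, (pvStepB cols (a, stk, cursors) m).2.1,
          (pvStepB cols (a, stk, cursors) m).2.2) := rfl
    rw [hA, hB, h1, h2]
    exact ih _ _ _ _ h3 (fun x hx => hmv x (List.mem_cons_of_mem _ hx))

lemma init_rel (cols : List (List Int)) :
    pvRel cols (cols.map (fun lane => lane.reverse.filter (fun x => x ≠ 0)))
      (List.replicate cols.length 0) := by
  refine ⟨by simp, by simp, fun j hj => ?_⟩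
  rw [List.getD_replicate _ hj, List.drop_zero]
  have h1 : (cols.map (fun lane => lane.reverse.filter (fun x => x ≠ 0))).getD j [] =
      cols[j].reverse.filter (fun x => x ≠ 0) := by
    rw [List.getD_eq_getElem?_getD, List.getElem?_map, List.getElem?_eq_getElem hj]
    rfl
  have h2 : cols.getD j [] = cols[j] := by
    rw [List.getD_eq_getElem?_getD, List.getElem?_eq_getElem hj]
    rfl
  rw [h1, h2, List.filter_reverse]

-- ===== VERDICT (by name: the statement is the Claim_ definition above) =====
theorem solution_spec : Claim_equal_solution := by
  intro board moves _ hpre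
  unfold Spec_solution solution solution_alt
  exact fold_sim (pvZip board) moves 0 [] _ _ (init_rel (pvZip board))
    (fun m hm => by rw [pvZip_length]; exact hpre m hm)
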